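-- pv_equiv track=rewrite | github.com/agama-point/agama_point_crypto | matrix_path.py | hex_to_bin_pairs
-- ===== SOURCE A (Python) =====
-- def hex_to_bin_pairs(hex_str):
--     """Převede hexadecimální řetězec na binární řetězec a rozdělí ho na dvojice."""
--     hex_str = hex_str.strip()
--     if hex_str.startswith("0x") or hex_str.startswith("0X"):
--         hex_str = hex_str[2:]
--     # Každá hex cifra se převede na 4-bitový řetězec
--     bin_str = ''.join(f"{int(c, 16):04b}" for c in hex_str)
--     # Pokud by byl počet bitů lichý, doplníme úvodní nulou (obvykle není nutné)
--     if len(bin_str) % 2 != 0: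
--         bin_str = "0" + bin_str
--     # Rozdělíme do dvojic
--     return [bin_str[i:i+2] for i in range(0, len(bin_str), 2)]
-- ===== SOURCE B (Python) =====
-- def hex_to_bin_pairs(hex_str):
--     """Převede hexadecimální řetězec rovnou na seznam 2-bitových dvojic,
--     cifru po cifře (každá hex cifra = 4 bity = přesně dvě dvojice)."""
--     hex_str = hex_str.strip()
--     if hex_str.startswith("0x") or hex_str.startswith("0X"):
--         hex_str = hex_str[2:]
--     pairs = []
--     for c in hex_str:
--         v = int(c, 16)
--         pairs.append(f"{v >> 2:02b}")
--         pairs.append(f"{v & 3:02b}")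
--     return pairs
-- ===== Notes on version B (the rewrite author's own statement) =====
-- stated objective: simpler
-- what changed: Instead of joining all hex digits into one flat bit string and then re-slicing it by index (with an odd-length padding branch that can never fire), B makes a single pass over the digits and emits each digit's two 2-bit pairs directly from v>>2 and v&3.
import Mathlib
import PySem

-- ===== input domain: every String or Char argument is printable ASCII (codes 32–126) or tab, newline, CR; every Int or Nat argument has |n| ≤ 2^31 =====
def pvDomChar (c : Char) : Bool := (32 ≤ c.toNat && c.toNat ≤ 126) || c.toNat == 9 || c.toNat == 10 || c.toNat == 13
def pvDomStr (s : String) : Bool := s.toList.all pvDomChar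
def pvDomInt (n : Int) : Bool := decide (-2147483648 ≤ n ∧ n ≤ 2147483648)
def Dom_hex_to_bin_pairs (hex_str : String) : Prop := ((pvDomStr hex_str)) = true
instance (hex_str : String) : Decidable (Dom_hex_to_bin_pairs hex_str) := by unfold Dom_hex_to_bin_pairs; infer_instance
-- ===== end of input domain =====

-- B emits the two 2-bit pairs of each hex digit directly in one pass (simpler: no joined
-- bit-string, no index slicing, no dead odd-length padding branch); equal output proved on Pre_.

-- shared helpers of both ports (both Pythons compute int(c, 16) and zero-padded binary f-strings)
-- f"{v:0{w}b}"; exact for 0 ≤ v (the only values reached here: hex-digit values and their halves)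
def pvFmtB (w : Nat) (v : Int) : List Char :=
  let d := PySem.Int.toBinChars v
  List.replicate (w - d.length) '0' ++ d

-- the 22 characters accepted by int(c, 16): 0-9, a-f, A-F
def pvIsHexDigit (c : Char) : Bool :=
  (48 ≤ c.toNat && c.toNat ≤ 57) || (97 ≤ c.toNat && c.toNat ≤ 102) || (65 ≤ c.toNat && c.toNat ≤ 70)

-- int(c, 16); none = ValueError (excluded by Pre_)
def pvHexVal? (c : Char) : Option Int := PySem.Int.ofCharsBase? [c] 16

-- the shared first two lines of both Pythons: strip, then drop a 0x/0X prefix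
def pvProcessed (hex_str : String) : List Char :=
  let s := PySem.Str.strip hex_str
  if PySem.Str.startswith s "0x" || PySem.Str.startswith s "0X" then
    PySem.List.slice s.toList (some 2) none
  else s.toList

-- ===== PORT A =====
def hex_to_bin_pairs (hex_str : String) : List String :=
  -- bin_str = ''.join(f"{int(c, 16):04b}" for c in hex_str)
  match (pvProcessed hex_str).mapM (fun c => (pvHexVal? c).map (pvFmtB 4)) with
  | none => []   -- a ValueError escaped the join; outside Pre_
  | some blocks =>
    let bin0 := blocks.flatten
    let bin_str := if PySem.Int.mod (PySem.List.len bin0) 2 ≠ 0 then '0' :: bin0 else bin0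
    (PySem.List.pyRange 0 (PySem.List.len bin_str) 2).map
      (fun i => String.ofList (PySem.List.slice bin_str (some i) (some (i + 2))))

-- ===== PORT B =====
def hex_to_bin_pairs_alt (hex_str : String) : List String :=
  -- for c in hex_str: v = int(c,16); pairs += [f"{v>>2:02b}", f"{v&3:02b}"]
  match (pvProcessed hex_str).foldl (fun acc c =>
      acc.bind fun ps => (pvHexVal? c).map fun (v : Int) =>
        ps ++ [String.ofList (pvFmtB 2 (v >>> (2 : Nat))),
               String.ofList (pvFmtB 2 (PySem.Int.band v 3))]) (some []) with
  | none => []   -- ValueError; outside Pre_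
  | some pairs => pairs

-- ===== PRECONDITION & SPEC =====
-- Pre_ excludes exactly the inputs on which A raises ValueError: after stripping and
-- removing a 0x/0X prefix some character is not a hexadecimal digit, so int(c, 16) raises.
def Pre_hex_to_bin_pairs (hex_str : String) : Prop :=
  ((pvProcessed hex_str).all pvIsHexDigit) = true
instance (hex_str : String) : Decidable (Pre_hex_to_bin_pairs hex_str) := by
  unfold Pre_hex_to_bin_pairs; infer_instance
def pvWitness_hex_to_bin_pairs : String := " 0x1F "

def Spec_hex_to_bin_pairs (hex_str : String) (out : List String) : Prop :=
  out = hex_to_bin_pairs_alt hex_str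
instance (hex_str : String) (out : List String) : Decidable (Spec_hex_to_bin_pairs hex_str out) := by
  unfold Spec_hex_to_bin_pairs; infer_instance

-- ===== CLAIM (what is proved, stated in full; the proofs are below) =====
def Claim_equal_hex_to_bin_pairs : Prop := ∀ (hex_str : String), Dom_hex_to_bin_pairs hex_str → Pre_hex_to_bin_pairs hex_str → Spec_hex_to_bin_pairs hex_str (hex_to_bin_pairs hex_str)

-- ===== LEMMAS AND PROOFS =====

-- value of a hex digit, as the ports see it
def pvV (c : Char) : Int := (pvHexVal? c).getD 0

-- per-digit facts over the 22 digit codes, by enumeration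
theorem pv_digit_facts_nat (n : Nat)
    (h : (48 ≤ n ∧ n ≤ 57) ∨ (97 ≤ n ∧ n ≤ 102) ∨ (65 ≤ n ∧ n ≤ 70)) :
    pvHexVal? (Char.ofNat n) = some (pvV (Char.ofNat n)) ∧
    pvFmtB 4 (pvV (Char.ofNat n)) =
      pvFmtB 2 (pvV (Char.ofNat n) >>> (2 : Nat)) ++
        pvFmtB 2 (PySem.Int.band (pvV (Char.ofNat n)) 3) ∧
    (pvFmtB 2 (pvV (Char.ofNat n) >>> (2 : Nat))).length = 2 ∧
    (pvFmtB 2 (PySem.Int.band (pvV (Char.ofNat n)) 3)).length = 2 := by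
  rcases h with ⟨h1, h2⟩ | ⟨h1, h2⟩ | ⟨h1, h2⟩ <;> interval_cases n <;> decide

-- per-digit facts: int(c,16) succeeds, its 4-bit block is the two 2-bit blocks, lengths
theorem pv_digit_facts (c : Char) (h : pvIsHexDigit c = true) :
    pvHexVal? c = some (pvV c) ∧
    pvFmtB 4 (pvV c) =
      pvFmtB 2 (pvV c >>> (2 : Nat)) ++ pvFmtB 2 (PySem.Int.band (pvV c) 3) ∧
    (pvFmtB 2 (pvV c >>> (2 : Nat))).length = 2 ∧
    (pvFmtB 2 (PySem.Int.band (pvV c) 3)).length = 2 := by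
  have hofnat := Char.ofNat_toNat c
  simp only [pvIsHexDigit, Bool.or_eq_true, Bool.and_eq_true, decide_eq_true_eq] at h
  have hfacts := pv_digit_facts_nat c.toNat (by tauto)
  rwa [hofnat] at hfacts

-- chunk into consecutive pairs
def pvChunk2 (cs : List Char) : List (List Char) :=
  match cs with
  | a :: b :: rest => [a, b] :: pvChunk2 rest
  | _ => []

theorem pyRange_step2 (k : Nat) :
    PySem.List.pyRange 0 (2 * (k : Int)) 2 = (List.range k).map (fun j : Nat => 2 * (j : Int)) := by
  rcases Nat.eq_zero_or_pos k with hk | hk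
  · subst hk; simp [PySem.List.pyRange]
  · have h1 : (0 : Int) < 2 * (k : Int) := by positivity
    have h2 : ((2 * (k : Int) - 0 + 2 - 1) / 2).toNat = k := by omega
    simp only [PySem.List.pyRange]
    rw [if_neg (by norm_num), if_pos (by norm_num), if_pos h1, h2]
    simp

theorem drop_take_pairs (m : Nat) (cs : List Char) (h : cs.length = 2 * m) :
    (List.range m).map (fun j => String.ofList ((cs.drop (2 * j)).take 2)) =
      (pvChunk2 cs).map String.ofList := by
  induction m generalizing cs with
  | zero =>
    have : cs = [] := List.eq_nil_of_length_eq_zero (by omega)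
    subst this; simp [pvChunk2]
  | succ m ih =>
    match cs, h with
    | a :: b :: rest, h =>
      rw [List.range_succ_eq_map]
      simp only [List.map_cons, List.map_map]
      rw [pvChunk2]
      simp only [List.map_cons]
      refine congrArg₂ _ (by simp) ?_
      have hih := ih rest (by simp only [List.length_cons] at h; omega)
      rw [← hih]
      apply List.map_congr_left
      intro j _
      have h21 : 2 * (Nat.succ j) = (2 * j) + 1 + 1 := by omega
      simp [Function.comp, h21]

-- chunk2 of a concatenation of (2+2)-blocks is the list of the 2-blocks
theorem chunk2_flatten (l : List (List Char × List Char))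
    (h : ∀ p ∈ l, p.1.length = 2 ∧ p.2.length = 2) :
    pvChunk2 ((l.map (fun p => p.1 ++ p.2)).flatten) = l.flatMap (fun p => [p.1, p.2]) := by
  induction l with
  | nil => rfl
  | cons p rest ih =>
    obtain ⟨h1, h2⟩ := h p (List.mem_cons_self ..)
    match p, h1, h2 with
    | (⟨[x1, x2], [y1, y2]⟩ : List Char × List Char), _, _ =>
      simp only [List.map_cons, List.flatten_cons, List.flatMap_cons]
      have := ih (fun q hq => h q (List.mem_cons_of_mem _ hq))
      simp only [List.cons_append, List.nil_append]
      rw [pvChunk2, pvChunk2]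
      simp [this]

-- flatten of all-length-4 blocks
theorem flatten_len4 (bs : List (List Char)) (h : ∀ b ∈ bs, b.length = 4) :
    bs.flatten.length = 4 * bs.length := by
  induction bs with
  | nil => simp
  | cons b rest ih =>
    simp only [List.flatten_cons, List.length_append, List.length_cons]
    rw [h b (List.mem_cons_self ..), ih (fun x hx => h x (List.mem_cons_of_mem _ hx))]
    ring

-- A's mapM succeeds on an all-hex-digit list and returns the mapped blocks
theorem mapM_hex (t : List Char) (h : ∀ c ∈ t, pvIsHexDigit c = true) :
    t.mapM (fun c => (pvHexVal? c).map (pvFmtB 4)) =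
      some (t.map (fun c => pvFmtB 4 (pvV c))) := by
  induction t with
  | nil => rfl
  | cons c rest ih =>
    have hc := (pv_digit_facts c (h c (List.mem_cons_self ..))).1
    rw [List.mapM_cons, hc]
    rw [ih (fun d hd => h d (List.mem_cons_of_mem _ hd))]
    rfl

-- B's foldl on an all-hex-digit list
theorem foldl_hex (t : List Char) (h : ∀ c ∈ t, pvIsHexDigit c = true) (ps : List String) :
    t.foldl (fun acc c =>
        acc.bind fun ps => (pvHexVal? c).map fun (v : Int) =>
          ps ++ [String.ofList (pvFmtB 2 (v >>> (2 : Nat))),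
                 String.ofList (pvFmtB 2 (PySem.Int.band v 3))]) (some ps) =
      some (ps ++ t.flatMap (fun c =>
        [String.ofList (pvFmtB 2 (pvV c >>> (2 : Nat))),
         String.ofList (pvFmtB 2 (PySem.Int.band (pvV c) 3))])) := by
  induction t generalizing ps with
  | nil => simp
  | cons c rest ih =>
    have hc := (pv_digit_facts c (h c (List.mem_cons_self ..))).1
    rw [List.foldl_cons]
    simp only [Option.bind_some, hc, Option.map_some]
    rw [ih (fun d hd => h d (List.mem_cons_of_mem _ hd))]
    simp

-- ===== VERDICT (by name: the statement is the Claim_ definition above) =====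
theorem hex_to_bin_pairs_spec : Claim_equal_hex_to_bin_pairs := by
  intro hex_str _ hpre
  unfold Spec_hex_to_bin_pairs hex_to_bin_pairs hex_to_bin_pairs_alt
  unfold Pre_hex_to_bin_pairs at hpre
  simp only [List.all_eq_true] at hpre
  set t : List Char := pvProcessed hex_str with ht
  have hhex : ∀ c ∈ t, pvIsHexDigit c = true := hpre
  simp only [mapM_hex t hhex, foldl_hex t hhex [], List.nil_append]
  -- the flattened bit string and its length
  set blocks := t.map (fun c => pvFmtB 4 (pvV c)) with hblocks
  have hlen4 : ∀ b ∈ blocks, b.length = 4 := by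
    intro b hb
    rw [hblocks] at hb
    obtain ⟨c, hc, rfl⟩ := List.mem_map.mp hb
    obtain ⟨-, heq, hl1, hl2⟩ := pv_digit_facts c (hhex c hc)
    rw [heq, List.length_append, hl1, hl2]
  have hflatlen : blocks.flatten.length = 4 * blocks.length := flatten_len4 blocks hlen4
  -- the padding branch is dead: the length is even
  have hmod : PySem.Int.mod (PySem.List.len blocks.flatten) 2 = 0 := by
    rw [(PySem.Int.mod_eq_zero_iff_dvd _ _)]
    simp only [PySem.List.len_eq, hflatlen]
    exact ⟨2 * (blocks.length : Int), by push_cast; ring⟩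
  rw [if_neg (fun hne => hne hmod)]
  -- rewrite A's pair slicing into chunk form
  have hlen2 : PySem.List.len blocks.flatten = 2 * ((2 * blocks.length : Nat) : Int) := by
    simp only [PySem.List.len_eq, hflatlen]; push_cast; ring
  rw [hlen2, pyRange_step2, List.map_map]
  have hslice : ∀ j ∈ List.range (2 * blocks.length),
      ((fun i => String.ofList (PySem.List.slice blocks.flatten (some i) (some (i + 2)))) ∘
        (fun j : Nat => 2 * (j : Int))) j =
      String.ofList ((blocks.flatten.drop (2 * j)).take 2) := by
    intro j _
    simp only [Function.comp]
    have h1 : 2 * (j : Int) = ((2 * j : Nat) : Int) := by push_cast; ring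
    rw [h1]
    have h2 : ((2 * j : Nat) : Int) + 2 = ((2 * j + 2 : Nat) : Int) := by push_cast; ring
    rw [h2, PySem.List.slice_natCast]
    simp
  rw [List.map_congr_left hslice]
  rw [drop_take_pairs (2 * blocks.length) blocks.flatten (by omega)]
  -- identify the chunks with B's per-digit pairs
  have hpairs : pvChunk2 blocks.flatten =
      t.flatMap (fun c =>
        [pvFmtB 2 (pvV c >>> (2 : Nat)), pvFmtB 2 (PySem.Int.band (pvV c) 3)]) := by
    have hrw : blocks =
        (t.map (fun c => (pvFmtB 2 (pvV c >>> (2 : Nat)),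
                          pvFmtB 2 (PySem.Int.band (pvV c) 3)))).map (fun p => p.1 ++ p.2) := by
      rw [hblocks, List.map_map]
      apply List.map_congr_left
      intro c hc
      exact (pv_digit_facts c (hhex c hc)).2.1
    rw [hrw, chunk2_flatten]
    · rw [List.flatMap_map]
    · intro p hp
      obtain ⟨c, hc, rfl⟩ := List.mem_map.mp hp
      obtain ⟨-, -, hl1, hl2⟩ := pv_digit_facts c (hhex c hc)
      exact ⟨hl1, hl2⟩
  rw [hpairs, List.map_flatMap]
  simp
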